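-- pv_equiv track=rewrite | github.com/venkatesh540-17/python-basics | day15/matchprefix2.py | matchingprefix
-- ===== SOURCE A (Python) =====
-- def matchingprefix(input):
--     prefix=input[0]
--     for word in input[1:]:
--         while not word.endswith(prefix):
--             prefix=prefix[1:]
--             if prefix=="":
--                 return""
--     return prefix
-- ===== SOURCE B (Python) =====
-- def matchingprefix(input):
--     rev = [w[::-1] for w in input]
--     acc = rev[0]
--     for r in rev[1:]:
--         i = 0
--         m = min(len(acc), len(r))
--         while i < m and acc[i] == r[i]:
--             i += 1
--         acc = acc[:i]
--     return acc[::-1]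
-- ===== Notes on version B (the rewrite author's own statement) =====
-- stated objective: alternative
-- what changed: Instead of repeatedly testing word.endswith(prefix) and stripping one leading character at a time, B reverses every word once and shrinks the accumulator by a single char-by-char longest-common-prefix scan per word.
-- outside the precondition, e.g. on matchingprefix([]): A raises IndexError, B raises IndexError
import Mathlib
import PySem

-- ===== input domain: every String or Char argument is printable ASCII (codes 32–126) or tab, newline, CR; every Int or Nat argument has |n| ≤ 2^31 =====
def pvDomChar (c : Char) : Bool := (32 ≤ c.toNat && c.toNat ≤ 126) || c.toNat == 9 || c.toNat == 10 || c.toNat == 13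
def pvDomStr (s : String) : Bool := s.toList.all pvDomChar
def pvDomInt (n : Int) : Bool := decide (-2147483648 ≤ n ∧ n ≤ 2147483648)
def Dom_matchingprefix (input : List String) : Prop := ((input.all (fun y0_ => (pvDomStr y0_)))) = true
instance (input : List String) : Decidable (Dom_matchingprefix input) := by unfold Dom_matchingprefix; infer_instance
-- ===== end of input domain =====

-- B replaces A's repeated endswith-and-strip scan by a single reverse-and-compare-columns pass; same return value on every nonempty input.

-- ===== PORT A =====
-- A's inner while loop: strip the first character until word.endswith(prefix); 'return ""' when it empties.
def shrinkA (word : List Char) (pre : List Char) : List Char :=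
  if PySem.Chars.endswith word pre then pre
  else
    let p := PySem.Chars.slice pre (some 1) none   -- prefix[1:]
    if p = [] then [] else shrinkA word p
termination_by pre.length
decreasing_by
  simp only [PySem.Chars.slice_eq_listSlice, PySem.List.slice_from_one]
  rcases pre with _ | ⟨c, pre'⟩
  · simp [PySem.Chars.endswith_iff] at *
  · simp

def matchingprefix (input : List String) : String :=
  match input with
  | [] => ""   -- input[0] raises IndexError here; excluded by Pre_matchingprefix
  | h :: t => String.ofList (t.foldl (fun pre w => shrinkA w.toList pre) h.toList)

-- ===== PORT B =====
-- Source B's while loop: first index i < m where acc[i] != r[i] (or m).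
def lcpLen (acc r : List Char) (m : Nat) (i : Nat) : Nat :=
  if i < m ∧ acc.getD i ' ' = r.getD i ' ' then lcpLen acc r m (i + 1) else i
termination_by m - i
decreasing_by omega

def matchingprefix_alt (input : List String) : String :=
  let rev := input.map (fun w => w.toList.reverse)   -- w[::-1]
  match rev with
  | [] => ""   -- rev[0] raises IndexError here; excluded by Pre_matchingprefix
  | a :: rest =>
    String.ofList
      ((rest.foldl
        (fun acc r =>
          PySem.List.slice acc none (some ((lcpLen acc r (min acc.length r.length) 0 : Nat) : Int)))
        a).reverse)

-- ===== PRECONDITION & SPEC =====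
-- A evaluates input[0], which raises IndexError on the empty list; Pre_ excludes exactly that.
def Pre_matchingprefix (input : List String) : Prop := input ≠ []
instance (input : List String) : Decidable (Pre_matchingprefix input) := by unfold Pre_matchingprefix; infer_instance
def pvWitness_matchingprefix : List String := ["xyab", "zzb ab", "b ab"]

def Spec_matchingprefix (input : List String) (out : String) : Prop := out = matchingprefix_alt input
instance (input : List String) (out : String) : Decidable (Spec_matchingprefix input out) := by unfold Spec_matchingprefix; infer_instance

-- ===== CLAIM (what is proved, stated in full; the proofs are below) =====
def Claim_equal_matchingprefix : Prop := ∀ (input : List String), Dom_matchingprefix input → Pre_matchingprefix input → Spec_matchingprefix input (matchingprefix input)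

-- ===== LEMMAS AND PROOFS =====

-- longest common prefix of two char lists (proof-side characterisation of both loops)
def lcp : List Char → List Char → List Char
  | a :: x, b :: y => if a = b then a :: lcp x y else []
  | _, _ => []

theorem lcp_comm : ∀ x y : List Char, lcp x y = lcp y x := by
  intro x
  induction x with
  | nil => intro y; cases y <;> simp [lcp]
  | cons a x ih =>
    intro y
    cases y with
    | nil => simp [lcp]
    | cons b y =>
      simp only [lcp]
      by_cases h : a = b
      · subst h; simp [ih]
      · simp [h, Ne.symm h]

theorem lcp_of_prefix : ∀ y x : List Char, y <+: x → lcp x y = y := by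
  intro y
  induction y with
  | nil => intro x _; cases x <;> simp [lcp]
  | cons b y ih =>
    intro x h
    rcases x with _ | ⟨a, x⟩
    · simp at h
    · rw [List.cons_prefix_cons] at h
      simp [lcp, h.1.symm, ih x h.2]

theorem lcp_snoc_not_prefix : ∀ x y : List Char, ∀ c : Char,
    ¬ (y ++ [c]) <+: x → lcp x (y ++ [c]) = lcp x y := by
  intro x
  induction x with
  | nil => intro y c _; cases y <;> simp [lcp]
  | cons a x ih =>
    intro y c h
    cases y with
    | nil =>
      simp only [List.nil_append] at *
      have hac : ¬ a = c := by
        intro hac; exact h (by simp [List.cons_prefix_cons, hac])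
      simp [lcp, hac]
    | cons b y =>
      simp only [List.cons_append, lcp]
      by_cases hab : a = b
      · subst hab
        have : ¬ (y ++ [c]) <+: x := by
          intro hp
          exact h (by simp only [List.cons_append]; exact List.cons_prefix_cons.mpr ⟨rfl, hp⟩)
        simp [ih y c this]
      · simp [hab]

theorem lcp_nil_right : ∀ x : List Char, lcp x [] = [] := by
  intro x; cases x <;> simp [lcp]

theorem shrinkA_eq_aux : ∀ (n : Nat) (p word : List Char), p.length ≤ n →
    shrinkA word p = (lcp word.reverse p.reverse).reverse := by
  intro n
  induction n with
  | zero =>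
    intro p word h
    have hp : p = [] := by cases p <;> simp_all
    subst hp
    rw [shrinkA]
    have he : PySem.Chars.endswith word [] = true := by
      rw [PySem.Chars.endswith_iff]; exact List.nil_suffix
    rw [if_pos he]
    simp [lcp_nil_right]
  | succ n ih =>
    intro p word h
    rw [shrinkA]
    by_cases he : PySem.Chars.endswith word p = true
    · rw [if_pos he]
      have hp : p <:+ word := (PySem.Chars.endswith_iff _ _).mp he
      have hrev : p.reverse <+: word.reverse := List.reverse_prefix.mpr hp
      rw [lcp_of_prefix _ _ hrev, List.reverse_reverse]
    · rw [if_neg he]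
      have hpne : p ≠ [] := by
        rintro rfl
        exact he (by rw [PySem.Chars.endswith_iff]; exact List.nil_suffix)
      rcases p with _ | ⟨c, p'⟩
      · exact absurd rfl hpne
      simp only [PySem.Chars.slice_eq_listSlice, PySem.List.slice_from_one, List.tail_cons]
      have hnp : ¬ (c :: p') <:+ word := fun hs => he ((PySem.Chars.endswith_iff _ _).mpr hs)
      have hrev : ¬ (p'.reverse ++ [c]) <+: word.reverse := by
        intro hpr
        apply hnp
        apply List.reverse_prefix.mp
        rw [List.reverse_cons]
        exact hpr
      have hl : lcp word.reverse (c :: p').reverse = lcp word.reverse p'.reverse := by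
        rw [List.reverse_cons]; exact lcp_snoc_not_prefix _ _ _ hrev
      rw [hl]
      by_cases hp' : p' = []
      · subst hp'; rw [if_pos rfl]; simp [lcp_nil_right]
      · rw [if_neg hp']
        exact ih p' word (by simp at h; omega)

theorem shrinkA_eq (p word : List Char) : shrinkA word p = (lcp word.reverse p.reverse).reverse :=
  shrinkA_eq_aux p.length p word le_rfl

theorem lcpLen_shift (x y : List Char) (a b : Char) :
    ∀ k m i, m - i = k → lcpLen (a :: x) (b :: y) (m + 1) (i + 1) = lcpLen x y m i + 1 := by
  intro k
  induction k with
  | zero =>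
    intro m i hk
    conv_lhs => rw [lcpLen]
    conv_rhs => rw [lcpLen]
    simp only [List.getD_cons_succ]
    have h1 : ¬ (i + 1 < m + 1 ∧ x.getD i ' ' = y.getD i ' ') := fun hc => absurd hc.1 (by omega)
    have h2 : ¬ (i < m ∧ x.getD i ' ' = y.getD i ' ') := fun hc => absurd hc.1 (by omega)
    rw [if_neg h1, if_neg h2]
  | succ k ihk =>
    intro m i hk
    conv_lhs => rw [lcpLen]
    conv_rhs => rw [lcpLen]
    simp only [List.getD_cons_succ]
    by_cases h : i < m ∧ x.getD i ' ' = y.getD i ' '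
    · have h' : i + 1 < m + 1 ∧ x.getD i ' ' = y.getD i ' ' := ⟨by omega, h.2⟩
      rw [if_pos h', if_pos h]
      exact ihk m (i + 1) (by omega)
    · have h' : ¬ (i + 1 < m + 1 ∧ x.getD i ' ' = y.getD i ' ') := by
        intro hc; exact h ⟨by omega, hc.2⟩
      rw [if_neg h', if_neg h]

theorem take_lcpLen : ∀ acc r : List Char,
    List.take (lcpLen acc r (min acc.length r.length) 0) acc = lcp acc r := by
  intro acc
  induction acc with
  | nil => intro r; rw [lcpLen]; simp [lcp]
  | cons a x ih =>
    intro r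
    cases r with
    | nil => rw [lcpLen]; simp [lcp]
    | cons b y =>
      have hm : min (a :: x).length (b :: y).length = min x.length y.length + 1 := by
        simp [List.length_cons, Nat.succ_min_succ]
      rw [hm, lcpLen]
      by_cases hab : a = b
      · have hc : 0 < min x.length y.length + 1 ∧ (a :: x).getD 0 ' ' = (b :: y).getD 0 ' ' := by
          simp [hab]
        rw [if_pos hc, lcpLen_shift x y a b (min x.length y.length) (min x.length y.length) 0 rfl]
        simp [lcp, hab, ih y]
      · have hc : ¬ (0 < min x.length y.length + 1 ∧ (a :: x).getD 0 ' ' = (b :: y).getD 0 ' ') := by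
          simp [hab]
        rw [if_neg hc]
        simp [lcp, hab]

theorem fold_eq : ∀ (t : List String) (p : List Char),
    t.foldl (fun pre w => shrinkA w.toList pre) p
      = ((t.map (fun w => w.toList.reverse)).foldl (fun acc r => lcp acc r) p.reverse).reverse := by
  intro t
  induction t with
  | nil => intro p; simp
  | cons w t ih =>
    intro p
    simp only [List.map_cons, List.foldl_cons]
    rw [ih (shrinkA w.toList p), shrinkA_eq, List.reverse_reverse, lcp_comm]

-- ===== VERDICT (by name: the statement is the Claim_ definition above) =====
theorem matchingprefix_spec : Claim_equal_matchingprefix := by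
  intro input _ hpre
  unfold Spec_matchingprefix matchingprefix matchingprefix_alt
  rcases input with _ | ⟨h, t⟩
  · exact absurd rfl hpre
  · simp only [List.map_cons]
    have hf : (fun (acc r : List Char) =>
        PySem.List.slice acc none (some ((lcpLen acc r (min acc.length r.length) 0 : Nat) : Int)))
        = fun (acc r : List Char) => lcp acc r := by
      funext acc r
      rw [PySem.List.slice_to_natCast, take_lcpLen]
    rw [fold_eq, hf]
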